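-- pv_equiv track=rewrite | github.com/olohade-r7/vc-plugin-docker | scan_engine/engine.py | _match_product
-- ===== SOURCE A (Python) =====
-- def _match_product(software_name: str, rule_product: str) -> bool:
--     """
--     Check if software name matches rule product
--     Uses fuzzy matching to handle variations
--     """
--     software_lower = software_name.lower().strip()
--     rule_lower = rule_product.lower().strip()
--
--     # Direct match
--     if software_lower == rule_lower:
--         return True
--
--     # Partial match (software name contains rule product or vice versa)
--     if software_lower in rule_lower or rule_lower in software_lower:
--         return True
--
--     # Common aliases
--     aliases = {
--         "docker": ["docker desktop", "docker engine", "docker"],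
--         "chrome": ["google chrome", "chromium", "chrome"],
--         "vscode": ["vs code", "visual studio code", "code"],
--         "node": ["node.js", "nodejs", "node"],
--         "python": ["python3", "python", "cpython"],
--         "pycharm": ["pycharm professional", "pycharm community", "pycharm"]
--     }
--
--     for key, names in aliases.items():
--         if software_lower in names or any(n in software_lower for n in names):
--             if rule_lower in names or any(n in rule_lower for n in names):
--                 return True
--
--     return False
-- ===== SOURCE B (Python) =====
-- ALIASES = {
--     "docker": ["docker desktop", "docker engine", "docker"],
--     "chrome": ["google chrome", "chromium", "chrome"],
--     "vscode": ["vs code", "visual studio code", "code"],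
--     "node": ["node.js", "nodejs", "node"],
--     "python": ["python3", "python", "cpython"],
--     "pycharm": ["pycharm professional", "pycharm community", "pycharm"],
-- }
--
-- # Flattened reverse index: one (alias, group-key) pair per alias string.
-- ALIAS_INDEX = [(alias, key) for key, names in ALIASES.items() for alias in names]
--
--
-- def _match_product(software_name: str, rule_product: str) -> bool:
--     software_lower = software_name.lower().strip()
--     rule_lower = rule_product.lower().strip()
--
--     if software_lower == rule_lower:
--         return True
--     if software_lower in rule_lower or rule_lower in software_lower:
--         return True
--
--     # Hash-join over the flat alias index: build the set of group keys whose
--     # alias occurs in the software name, then probe that set while scanning the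
--     # rule side, short-circuiting on the first hit.  (No exact-membership test
--     # is needed: an alias equal to the name is also a substring of it.)
--     software_groups = {key for alias, key in ALIAS_INDEX if alias in software_lower}
--     return any(key in software_groups
--                for alias, key in ALIAS_INDEX if alias in rule_lower)
-- ===== Notes on version B (the rewrite author's own statement) =====
-- stated objective: alternative
-- what changed: A's nested per-group loop with a fused exact-membership-or-substring double test is replaced by a hash-join over a flattened (alias, key) reverse index: build the software side's group-key set in one flat scan (the exact-membership test dropped as redundant, since an alias equal to the name is a substring of it), then probe that set while scanning the rule side with short-circuit.
import Mathlib
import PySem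

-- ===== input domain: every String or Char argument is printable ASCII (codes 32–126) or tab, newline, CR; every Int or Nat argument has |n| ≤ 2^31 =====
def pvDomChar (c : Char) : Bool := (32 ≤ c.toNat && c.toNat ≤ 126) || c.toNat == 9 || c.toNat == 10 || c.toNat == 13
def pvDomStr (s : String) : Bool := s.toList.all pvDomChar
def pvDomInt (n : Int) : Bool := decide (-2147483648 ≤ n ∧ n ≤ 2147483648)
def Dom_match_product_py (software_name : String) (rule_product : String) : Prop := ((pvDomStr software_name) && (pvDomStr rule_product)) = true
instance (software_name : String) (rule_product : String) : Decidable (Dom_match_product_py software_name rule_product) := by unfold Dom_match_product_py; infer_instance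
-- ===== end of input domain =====

-- B replaces A's nested per-group double-test loop by a hash-join over a flattened
-- (alias, group-key) reverse index: build the software side's key set, probe it with
-- the rule side (objective: alternative decomposition, same cost).

-- ===== PORT A =====
-- the common aliases table (shared constant of both programs)
def pvAliases : List (String × List String) :=
  [("docker", ["docker desktop", "docker engine", "docker"]),
   ("chrome", ["google chrome", "chromium", "chrome"]),
   ("vscode", ["vs code", "visual studio code", "code"]),
   ("node", ["node.js", "nodejs", "node"]),
   ("python", ["python3", "python", "cpython"]),
   ("pycharm", ["pycharm professional", "pycharm community", "pycharm"])]

-- A's 'for key, names in aliases.items(): if … : if … : return True' loop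
def pvMatchLoop (sl rl : String) : List (String × List String) → Bool
  | [] => false
  | (_, names) :: rest =>
    if names.contains sl || names.any (fun n => PySem.Str.isIn n sl) then
      if names.contains rl || names.any (fun n => PySem.Str.isIn n rl) then
        true
      else
        pvMatchLoop sl rl rest
    else
      pvMatchLoop sl rl rest

def match_product_py (software_name : String) (rule_product : String) : Bool :=
  let software_lower := PySem.Str.strip (PySem.Str.lower software_name)
  let rule_lower := PySem.Str.strip (PySem.Str.lower rule_product)
  if software_lower == rule_lower then
    true
  else if PySem.Str.isIn software_lower rule_lower || PySem.Str.isIn rule_lower software_lower then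
    true
  else
    pvMatchLoop software_lower rule_lower pvAliases

-- ===== PORT B =====
-- Source B's ALIAS_INDEX: flattened reverse index, one (alias, key) pair per alias string
def pvAliasIndex : List (String × String) :=
  pvAliases.flatMap (fun p => p.2.map (fun al => (al, p.1)))

def match_product_py_alt (software_name : String) (rule_product : String) : Bool :=
  let software_lower := PySem.Str.strip (PySem.Str.lower software_name)
  let rule_lower := PySem.Str.strip (PySem.Str.lower rule_product)
  if software_lower == rule_lower then
    true
  else if PySem.Str.isIn software_lower rule_lower || PySem.Str.isIn rule_lower software_lower then
    true
  else
    -- build: software side's group-key set over the flat index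
    let software_groups : PySem.Set String :=
      PySem.Set.ofList
        ((pvAliasIndex.filter (fun q => PySem.Str.isIn q.1 software_lower)).map Prod.snd)
    -- probe: scan the rule side of the index, short-circuit on the first key hit
    (pvAliasIndex.filter (fun q => PySem.Str.isIn q.1 rule_lower)).any
      (fun q => PySem.Set.contains software_groups q.2)

-- ===== PRECONDITION & SPEC =====
def Spec_match_product_py (software_name : String) (rule_product : String) (out : Bool) : Prop := out = match_product_py_alt software_name rule_product
instance (software_name : String) (rule_product : String) (out : Bool) : Decidable (Spec_match_product_py software_name rule_product out) := by unfold Spec_match_product_py; infer_instance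

-- ===== CLAIM (what is proved, stated in full; the proofs are below) =====
def Claim_equal_match_product_py : Prop := ∀ (software_name : String) (rule_product : String), Dom_match_product_py software_name rule_product → Spec_match_product_py software_name rule_product (match_product_py software_name rule_product)

-- ===== LEMMAS AND PROOFS =====

-- A's per-group membership test
def pvCondA (name : String) (p : String × List String) : Bool :=
  p.2.contains name || p.2.any (fun n => PySem.Str.isIn n name)

-- the substring-only test (B's per-alias test, lifted to a group)
def pvCondB (name : String) (p : String × List String) : Bool :=
  p.2.any (fun n => PySem.Str.isIn n name)

theorem pvIsIn_self (s : String) : PySem.Str.isIn s s = true :=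
  (PySem.Str.isIn_iff_infix s s).mpr (List.infix_refl _)

-- the exact-membership disjunct of A's test is redundant
theorem pvCondA_eq_condB (name : String) (p : String × List String) :
    pvCondA name p = pvCondB name p := by
  unfold pvCondA pvCondB
  cases h : p.2.contains name with
  | false => simp
  | true =>
    have hm : name ∈ p.2 := by simpa using h
    have hany : p.2.any (fun n => PySem.Str.isIn n name) = true :=
      List.any_eq_true.mpr ⟨name, hm, pvIsIn_self name⟩
    simp only [hany, Bool.or_true]

-- A's loop is an existential over groups of the conjunction of the two tests
theorem pvMatchLoop_eq_any (sl rl : String) (L : List (String × List String)) :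
    pvMatchLoop sl rl L = L.any (fun p => pvCondA sl p && pvCondA rl p) := by
  induction L with
  | nil => rfl
  | cons p rest ih =>
    obtain ⟨k, names⟩ := p
    have hstep : pvMatchLoop sl rl ((k, names) :: rest) =
        (if pvCondA sl (k, names) then
          (if pvCondA rl (k, names) then true else pvMatchLoop sl rl rest)
         else pvMatchLoop sl rl rest) := rfl
    rw [hstep, List.any_cons]
    cases h1 : pvCondA sl (k, names) <;> cases h2 : pvCondA rl (k, names) <;>
      simp [*]

-- membership in the flattened index of any table
theorem mem_flat_index (a k : String) (L : List (String × List String)) :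
    (a, k) ∈ L.flatMap (fun p => p.2.map (fun al => (al, p.1))) ↔
      ∃ p ∈ L, p.1 = k ∧ a ∈ p.2 := by
  simp only [List.mem_flatMap, List.mem_map, Prod.mk.injEq]
  constructor
  · rintro ⟨p, hp, a', ha', rfl, rfl⟩; exact ⟨p, hp, rfl, ha'⟩
  · rintro ⟨p, hp, rfl, ha⟩; exact ⟨p, hp, a, ha, rfl, rfl⟩

-- B's build-and-probe over the flattened index equals A's existential,
-- for any table with distinct keys
theorem pvJoin_eq_any (sl rl : String) (L : List (String × List String))
    (hkeys : (L.map Prod.fst).Nodup) :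
    (((L.flatMap (fun p => p.2.map (fun al => (al, p.1)))).filter
        (fun q => PySem.Str.isIn q.1 rl)).any
      (fun q => PySem.Set.contains
        (PySem.Set.ofList
          (((L.flatMap (fun p => p.2.map (fun al => (al, p.1)))).filter
              (fun q => PySem.Str.isIn q.1 sl)).map Prod.snd)) q.2)) =
      L.any (fun p => pvCondB sl p && pvCondB rl p) := by
  have hinj : ∀ p ∈ L, ∀ q ∈ L, p.1 = q.1 → p = q :=
    List.inj_on_of_nodup_map hkeys
  set idx := L.flatMap (fun p => p.2.map (fun al => (al, p.1))) with hidx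
  rw [Bool.eq_iff_iff]
  simp only [List.any_eq_true, List.mem_filter, PySem.Set.contains_iff,
    PySem.Set.mem_ofList, List.mem_map, pvCondB, Bool.and_eq_true]
  constructor
  · rintro ⟨⟨a, k⟩, ⟨hq, hrl⟩, ⟨a', k'⟩, ⟨hq', hsl⟩, hk⟩
    simp only at hrl hsl hk
    subst hk
    rw [hidx, mem_flat_index] at hq hq'
    obtain ⟨p, hp, hpk, hap⟩ := hq
    obtain ⟨p', hp', hpk', hap'⟩ := hq'
    have hpp : p' = p := hinj p' hp' p hp (hpk'.trans hpk.symm)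
    exact ⟨p, hp, ⟨a', hpp ▸ hap', hsl⟩, ⟨a, hap, hrl⟩⟩
  · rintro ⟨p, hp, hs, hr⟩
    obtain ⟨as, has, hsl⟩ := hs
    obtain ⟨ar, har, hrl⟩ := hr
    refine ⟨(ar, p.1), ⟨?_, hrl⟩, (as, p.1), ⟨?_, hsl⟩, rfl⟩
    · rw [hidx, mem_flat_index]; exact ⟨p, hp, rfl, har⟩
    · rw [hidx, mem_flat_index]; exact ⟨p, hp, rfl, has⟩

-- ===== VERDICT (by name: the statement is the Claim_ definition above) =====
theorem match_product_py_spec : Claim_equal_match_product_py := by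
  intro software_name rule_product _
  unfold Spec_match_product_py match_product_py match_product_py_alt
  simp only []
  split_ifs with h1 h2
  · rfl
  · rfl
  · rw [pvMatchLoop_eq_any]
    simp only [pvCondA_eq_condB]
    rw [show pvAliasIndex = pvAliases.flatMap
      (fun p => p.2.map (fun al => (al, p.1))) from rfl]
    rw [pvJoin_eq_any _ _ _ (by decide)]
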